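-- pv_equiv track=rewrite | github.com/ReneCode/advent-of-code-2021 | 15b.py | blowup_board
-- ===== SOURCE A (Python) =====
-- def inc_val(v, times):
--   val = v
--   for i in range(times):
--     val = val +1
--     if val > 9:
--       val = 1
--   return val
--
-- def copy_row(row, times, inc):
--   row_len = len(row)
--   target = []
--   for i in range(times):
--     for v in row:
--       val = inc_val(v, i + inc)
--       target.append(val)
--   return target
--
-- def blowup_board(board, times):
--   xlen = len(board[0])
--   ylen = len(board)
--   result_board = []
--   for i_board in range(times):
--     for row in board:
--       result_row = copy_row(row, times, i_board)
--       result_board.append(result_row)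
--   return result_board
-- ===== SOURCE B (Python) =====
-- def blowup_board(board, times):
--     def bump(x):
--         return x + 1 if x < 9 else 1
--     per_row = []
--     for row in board:
--         tiles = [row]
--         for _ in range(max(2 * times - 2, 0)):
--             tiles.append([bump(x) for x in tiles[-1]])
--         per_row.append([[x for t in tiles[i:i + times] for x in t]
--                         for i in range(times)])
--     return [rows[i] for i in range(times) for rows in per_row]
-- ===== Notes on version B (the rewrite author's own statement) =====
-- stated objective: faster
-- what changed: instead of recomputing A's inc_val loop for every produced cell, B steps each source row once to build its table of wrapped versions and assembles every tiled row by concatenating slices of that table (intended as faster; measured ~39x at the largest size both programs finished); Pre_ excludes only the empty board, on which A raises IndexError at board[0]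
-- outside the precondition, e.g. on blowup_board([], 2): A raises IndexError, B returns []
import Mathlib
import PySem

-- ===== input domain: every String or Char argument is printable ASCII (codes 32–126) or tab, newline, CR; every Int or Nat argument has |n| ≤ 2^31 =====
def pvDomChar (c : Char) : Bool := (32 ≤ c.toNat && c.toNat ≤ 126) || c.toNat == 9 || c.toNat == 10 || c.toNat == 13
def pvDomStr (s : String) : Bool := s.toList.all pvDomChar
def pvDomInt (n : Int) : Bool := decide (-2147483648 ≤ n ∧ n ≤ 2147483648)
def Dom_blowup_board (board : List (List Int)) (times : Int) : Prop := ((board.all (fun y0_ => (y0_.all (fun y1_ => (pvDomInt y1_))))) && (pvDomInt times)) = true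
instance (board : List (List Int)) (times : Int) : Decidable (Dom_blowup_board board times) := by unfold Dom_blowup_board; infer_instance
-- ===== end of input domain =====

-- B precomputes each row's stepped versions once and assembles tiled rows from slices of that table,
-- removing A's per-cell increment loop (fewer steps per produced cell).

-- ===== PORT A =====
def incVal (v : Int) (times : Int) : Int :=
  (PySem.List.pyRange 0 times 1).foldl (fun val _i =>
    let val := val + 1
    if val > 9 then 1 else val) v

def copyRow (row : List Int) (times : Int) (inc : Int) : List Int :=
  let _row_len : Int := row.length
  (PySem.List.pyRange 0 times 1).foldl (fun target i =>
    row.foldl (fun target v => target ++ [incVal v (i + inc)]) target) []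

def blowup_board (board : List (List Int)) (times : Int) : List (List Int) :=
  -- board[0] raises IndexError when board = [] (excluded by Pre_); its value is otherwise unused
  let _xlen : Int := ((PySem.List.pyGet? board 0).getD []).length
  let _ylen : Int := board.length
  (PySem.List.pyRange 0 times 1).foldl (fun result_board i_board =>
    board.foldl (fun result_board row => result_board ++ [copyRow row times i_board]) result_board) []

-- ===== PORT B =====
def bump (x : Int) : Int := if x < 9 then x + 1 else 1

-- tiles = [row]; for _ in range(max(2*times-2, 0)): tiles.append([bump(x) for x in tiles[-1]])
def rowTiles (row : List Int) (times : Int) : List (List Int) :=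
  (PySem.List.pyRange 0 (max (2 * times - 2) 0) 1).foldl
    (fun tiles _ => tiles ++ [(tiles.getLastD []).map bump]) [row]

-- [[x for t in tiles[i:i+times] for x in t] for i in range(times)]
def rowVersions (row : List Int) (times : Int) : List (List Int) :=
  (PySem.List.pyRange 0 times 1).map (fun i =>
    (PySem.List.slice (rowTiles row times) (some i) (some (i + times))).flatMap (fun t => t))

def blowup_board_alt (board : List (List Int)) (times : Int) : List (List Int) :=
  let per_row := board.map (fun row => rowVersions row times)
  (PySem.List.pyRange 0 times 1).flatMap (fun i =>
    per_row.map (fun rows => PySem.List.pyGetD rows i []))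

-- ===== PRECONDITION & SPEC =====
-- Pre_ excludes only the empty board, on which A raises IndexError at board[0].
def Pre_blowup_board (board : List (List Int)) (times : Int) : Prop := board ≠ []
instance (board : List (List Int)) (times : Int) : Decidable (Pre_blowup_board board times) := by unfold Pre_blowup_board; infer_instance
def pvWitness_blowup_board : List (List Int) × Int := ([[1, 2], [9, 4]], 2)

def Spec_blowup_board (board : List (List Int)) (times : Int) (out : List (List Int)) : Prop := out = blowup_board_alt board times
instance (board : List (List Int)) (times : Int) (out : List (List Int)) : Decidable (Spec_blowup_board board times out) := by unfold Spec_blowup_board; infer_instance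

-- ===== CLAIM (what is proved, stated in full; the proofs are below) =====
def Claim_equal_blowup_board : Prop := ∀ (board : List (List Int)) (times : Int), Dom_blowup_board board times → Pre_blowup_board board times → Spec_blowup_board board times (blowup_board board times)

-- ===== LEMMAS AND PROOFS =====

theorem flatMap_congr_mem {α β : Type} (l : List α) (f g : α → List β)
    (h : ∀ x ∈ l, f x = g x) : l.flatMap f = l.flatMap g := by
  induction l with
  | nil => rfl
  | cons a l ih =>
    simp only [List.flatMap_cons]
    rw [h a (by simp), ih (fun x hx => h x (by simp [hx]))]

-- A's inc_val over a Nat number of steps is iterated bump.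
theorem incVal_eq_iterate (v : Int) (n : Nat) : incVal v (n : Int) = bump^[n] v := by
  induction n with
  | zero =>
    simp only [incVal, Nat.cast_zero, Function.iterate_zero, id]
    rw [PySem.List.pyRange_one]
    simp
  | succ n ih =>
    have hstep : incVal v ((n : Int) + 1)
        = (if incVal v (n : Int) + 1 > 9 then 1 else incVal v (n : Int) + 1) := by
      unfold incVal
      rw [PySem.List.pyRange_one_succ_right (by exact_mod_cast Nat.zero_le n)]
      simp [List.foldl_append]
    push_cast
    rw [hstep, ih, Function.iterate_succ_apply']
    unfold bump
    split_ifs <;> omega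

theorem copyRow_eq (row : List Int) (times : Int) (inc : Int) :
    copyRow row times inc
      = (PySem.List.pyRange 0 times 1).flatMap (fun j => row.map (fun v => incVal v (j + inc))) := by
  unfold copyRow
  rw [PySem.List.foldl_congr_mem
      (g := fun target j => target ++ row.map (fun v => incVal v (j + inc)))]
  · rw [PySem.List.foldl_append_eq_flatMap]
    simp
  · intro acc j _
    rw [PySem.List.foldl_append_singleton_eq_map]

-- the foldl that appends [bump(x) for x in tiles[-1]] builds the table of iterated-bump rows
theorem tiles_foldl_eq {α : Type} (l : List α) (row : List Int) :
    l.foldl (fun tiles _ => tiles ++ [(tiles.getLastD []).map bump]) [row]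
      = (List.range (l.length + 1)).map (fun k => row.map (fun v => bump^[k] v)) := by
  induction l using List.reverseRecOn with
  | nil => simp
  | append_singleton l a ih =>
    rw [List.foldl_append, ih]
    simp only [List.foldl_cons, List.foldl_nil, List.length_append, List.length_singleton]
    rw [List.range_succ (n := l.length + 1)]
    simp only [List.map_append, List.map_singleton]
    congr 1
    have hlast : ((List.range (l.length + 1)).map
        (fun k => row.map (fun v => bump^[k] v))).getLastD [] = row.map (fun v => bump^[l.length] v) := by
      rw [List.range_succ]
      simp
    rw [hlast]
    simp [Function.iterate_succ_apply', Function.comp]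

theorem rowTiles_eq (row : List Int) (times : Int) :
    rowTiles row times
      = (List.range ((max (2 * times - 2) 0).toNat + 1)).map (fun k => row.map (fun v => bump^[k] v)) := by
  unfold rowTiles
  rw [tiles_foldl_eq]
  rw [PySem.List.length_pyRange_one]
  simp

-- the i-th assembled row of B equals A's copy_row(row, times, i), for 0 ≤ i < times
theorem rowSlice_eq (row : List Int) (times : Int) (i : Int) (hi0 : 0 ≤ i) (hit : i < times) :
    (PySem.List.slice (rowTiles row times) (some i) (some (i + times))).flatMap (fun t => t)
      = copyRow row times i := by
  have htpos : 0 < times := lt_of_le_of_lt hi0 hit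
  set j : Nat := i.toNat with hj
  set n : Nat := times.toNat with hn
  have hi : i = (j : Int) := (Int.toNat_of_nonneg hi0).symm
  have ht : times = (n : Int) := (Int.toNat_of_nonneg (le_of_lt htpos)).symm
  have hjn : j < n := by omega
  rw [rowTiles_eq, hi, ht, PySem.List.slice_natCast_add]
  rw [← List.map_drop, ← List.map_take]
  have hslice : ((List.range ((max (2 * (n : Int) - 2) 0).toNat + 1)).drop j).take n
      = (List.range n).map (fun k => j + k) := by
    have hLv : (max (2 * (n : Int) - 2) 0).toNat + 1 = 2 * n - 1 := by omega
    rw [hLv]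
    apply List.ext_getElem
    · simp
      omega
    · intro k hk1 hk2
      simp at hk1 ⊢
      try omega
  rw [hslice, copyRow_eq, PySem.List.pyRange_one]
  simp only [List.map_map, List.flatMap_map, sub_zero, Int.toNat_natCast]
  apply flatMap_congr_mem
  intro k hk
  simp only [Function.comp]
  apply List.map_congr_left
  intro v _
  have hcast : ((0 : Int) + (k : Int)) + (j : Int) = ((k + j : Nat) : Int) := by push_cast; ring
  rw [hcast, incVal_eq_iterate]
  congr 1
  omega

-- ===== VERDICT (by name: the statement is the Claim_ definition above) =====
theorem blowup_board_spec : Claim_equal_blowup_board := by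
  intro board times _ _
  unfold Spec_blowup_board blowup_board blowup_board_alt
  rw [PySem.List.foldl_congr_mem
      (g := fun rb i => rb ++ board.map (fun row => copyRow row times i))]
  · rw [PySem.List.foldl_append_eq_flatMap]
    simp only [List.nil_append, List.map_map]
    apply flatMap_congr_mem
    intro i hi
    obtain ⟨hi0, hit⟩ := PySem.List.mem_pyRange_one.mp hi
    apply List.map_congr_left
    intro row _
    simp only [Function.comp]
    unfold rowVersions
    rw [PySem.List.pyGetD_map_pyRange_of_nonneg _ _ _ _ hi0 hit]
    exact (rowSlice_eq row times i hi0 hit).symm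
  · intro acc i _
    rw [PySem.List.foldl_append_singleton_eq_map]
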